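-- pv_equiv track=rewrite | github.com/kesa0v0/midiGen | src/preprocessor/conductor_generator.py | _expand_prog_grid
-- ===== SOURCE A (Python) =====
-- def _expand_prog_grid(prog_grid):
--     expanded = []
--     prev = None
--     for bar in prog_grid:
--         for tok in bar:
--             if tok == "-" and prev is not None:
--                 expanded.append(prev)
--             else:
--                 expanded.append(tok)
--                 prev = tok
--     return expanded
-- ===== SOURCE B (Python) =====
-- def _expand_prog_grid(prog_grid):
--     flat = [tok for bar in prog_grid for tok in bar]
--     n = len(flat)
--     out = []
--     i = 0
--     # leading dashes have no previous token: emitted verbatim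
--     while i < n and flat[i] == "-":
--         out.append("-")
--         i += 1
--     # each non-dash token covers itself plus its run of following dashes
--     while i < n:
--         j = i + 1
--         while j < n and flat[j] == "-":
--             j += 1
--         out.extend([flat[i]] * (j - i))
--         i = j
--     return out
-- ===== Notes on version B (the rewrite author's own statement) =====
-- stated objective: alternative
-- what changed: Replaces the token-by-token scan that carries a 'prev' variable with a run-length pass: flatten the grid, emit leading dashes verbatim, then for each non-dash token find the run of dashes following it and emit that token repeated (run length + 1) times.
import Mathlib
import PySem

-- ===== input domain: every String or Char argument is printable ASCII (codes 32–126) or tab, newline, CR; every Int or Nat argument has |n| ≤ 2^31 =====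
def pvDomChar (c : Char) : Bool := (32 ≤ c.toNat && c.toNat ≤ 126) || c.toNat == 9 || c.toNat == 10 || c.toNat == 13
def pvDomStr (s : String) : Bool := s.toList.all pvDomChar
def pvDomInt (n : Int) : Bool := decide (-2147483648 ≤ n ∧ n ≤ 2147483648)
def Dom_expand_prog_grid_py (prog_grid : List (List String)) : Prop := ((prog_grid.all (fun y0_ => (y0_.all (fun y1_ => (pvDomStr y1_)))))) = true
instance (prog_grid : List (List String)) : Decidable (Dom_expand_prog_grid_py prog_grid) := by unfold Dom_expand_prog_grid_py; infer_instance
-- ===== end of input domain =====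

-- B replaces A's carried-prev scan with a run-length pass (leading dashes verbatim, then each non-dash token replicated over its dash run); alternative decomposition, same cost; return value only.


-- ===== PORT A =====
-- one iteration of A's inner loop: state = (expanded, prev)
def pvStepA (st : List String × Option String) (tok : String) : List String × Option String :=
  match st.2 with
  | some p => if tok = "-" then (st.1 ++ [p], some p) else (st.1 ++ [tok], some tok)
  | none   => (st.1 ++ [tok], some tok)

def expand_prog_grid_py (prog_grid : List (List String)) : List String :=
  (prog_grid.foldl (fun st bar => bar.foldl pvStepA st) ([], none)).1

-- ===== PORT B =====
-- the inner run loop: a non-dash token plus its run of following dashes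
def pvRuns : List String → List String
  | [] => []
  | tok :: t =>
      List.replicate ((t.takeWhile (fun s => s == "-")).length + 1) tok
        ++ pvRuns (t.dropWhile (fun s => s == "-"))
termination_by l => l.length
decreasing_by
  simp only [List.length_cons]
  exact Nat.lt_succ_of_le (List.length_dropWhile_le _ _)

def expand_prog_grid_py_alt (prog_grid : List (List String)) : List String :=
  let flat := prog_grid.flatMap id
  flat.takeWhile (fun s => s == "-") ++ pvRuns (flat.dropWhile (fun s => s == "-"))

-- ===== PRECONDITION & SPEC =====
def Spec_expand_prog_grid_py (prog_grid : List (List String)) (out : List String) : Prop := out = expand_prog_grid_py_alt prog_grid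
instance (prog_grid : List (List String)) (out : List String) : Decidable (Spec_expand_prog_grid_py prog_grid out) := by unfold Spec_expand_prog_grid_py; infer_instance

-- ===== CLAIM (what is proved, stated in full; the proofs are below) =====
def Claim_equal_expand_prog_grid_py : Prop := ∀ (prog_grid : List (List String)), Dom_expand_prog_grid_py prog_grid → Spec_expand_prog_grid_py prog_grid (expand_prog_grid_py prog_grid)

-- ===== LEMMAS AND PROOFS =====

-- the forward-fill combining function characterising A's scan
def pvFill (prev tok : String) : String := if tok = "-" then prev else tok

-- the body of B, applied to an arbitrary flat list
def pvAlt (l : List String) : List String :=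
  l.takeWhile (fun s => s == "-") ++ pvRuns (l.dropWhile (fun s => s == "-"))

lemma pvRuns_nil : pvRuns [] = [] := by rw [pvRuns]

lemma pvRuns_cons (tok : String) (t : List String) :
    pvRuns (tok :: t)
      = List.replicate ((t.takeWhile (fun s => s == "-")).length + 1) tok
          ++ pvRuns (t.dropWhile (fun s => s == "-")) := by rw [pvRuns]

lemma pvRuns_cons_dash (h : String) (t : List String) :
    pvRuns (h :: "-" :: t) = h :: pvRuns (h :: t) := by
  rw [pvRuns_cons, pvRuns_cons]
  simp [List.replicate_succ]

lemma pvAlt_dash (t : List String) : pvAlt ("-" :: t) = "-" :: pvAlt t := by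
  simp [pvAlt]

lemma pvAlt_runs (h : String) (t : List String) (hh : ¬ h = "-") :
    pvAlt (h :: t) = pvRuns (h :: t) := by
  simp [pvAlt, hh]

-- head of a scanl is the seed
lemma scanl_cons_tail (f : String → String → String) (b : String) (l : List String) :
    b :: (List.scanl f b l).tail = List.scanl f b l := by
  cases l <;> simp [List.scanl]

-- A's nested fold equals the fold over the flattened list
lemma foldA_flat (g : List (List String)) (st : List String × Option String) :
    g.foldl (fun st bar => bar.foldl pvStepA st) st = (g.flatMap id).foldl pvStepA st := by
  induction g generalizing st with
  | nil => rfl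
  | cons b g ih => simp [List.flatMap_cons, List.foldl_append, ih]

-- once prev is some p, A's fold appends the tail of the forward-fill scan
lemma foldA_some (l : List String) (acc : List String) (p : String) :
    l.foldl pvStepA (acc, some p)
      = (acc ++ (List.scanl pvFill p l).tail, some (l.foldl pvFill p)) := by
  induction l generalizing acc p with
  | nil => simp
  | cons tok l ih =>
    simp only [List.foldl_cons, List.scanl_cons, pvStepA, pvFill]
    by_cases h : tok = "-" <;> simp [h, ih, scanl_cons_tail]

-- B's run-length body absorbs one forward-fill step
lemma pvAlt_step (h x : String) (xs : List String) :
    pvAlt (h :: x :: xs) = h :: pvAlt (pvFill h x :: xs) := by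
  by_cases hx : x = "-"
  · subst hx
    by_cases hh : h = "-"
    · subst hh
      rw [pvAlt_dash]
      simp [pvFill]
    · rw [pvAlt_runs _ _ hh, pvRuns_cons_dash]
      have hfh : pvFill h "-" = h := by simp [pvFill]
      rw [hfh, pvAlt_runs _ _ hh]
  · have hfx : pvFill h x = x := by simp [pvFill, hx]
    rw [hfx]
    by_cases hh : h = "-"
    · subst hh
      rw [pvAlt_dash]
    · rw [pvAlt_runs _ _ hh, pvRuns_cons]
      simp [hx, pvAlt_runs _ _ hx]

-- A's forward-fill scan equals B's run-length body
lemma scan_alt (h : String) (t : List String) :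
    List.scanl pvFill h t = pvAlt (h :: t) := by
  induction t generalizing h with
  | nil =>
    by_cases hh : h = "-"
    · subst hh
      rw [pvAlt_dash]
      simp [pvAlt, pvRuns_nil, List.scanl]
    · rw [pvAlt_runs _ _ hh, pvRuns_cons]
      simp [pvRuns_nil, List.scanl]
  | cons x xs ih =>
    rw [pvAlt_step]
    simp only [List.scanl_cons]
    rw [ih (pvFill h x)]

-- ===== VERDICT (by name: the statement is the Claim_ definition above) =====
theorem expand_prog_grid_py_spec : Claim_equal_expand_prog_grid_py := by
  intro g _
  show expand_prog_grid_py g = expand_prog_grid_py_alt g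
  unfold expand_prog_grid_py expand_prog_grid_py_alt
  rw [foldA_flat]
  cases hf : g.flatMap id with
  | nil => simp [pvRuns_nil]
  | cons h t =>
    simp only [List.foldl_cons, pvStepA, foldA_some, List.nil_append]
    have h2 := scan_alt h t
    simp only [pvAlt] at h2
    calc [h] ++ (List.scanl pvFill h t).tail
        = h :: (List.scanl pvFill h t).tail := by simp
      _ = List.scanl pvFill h t := scanl_cons_tail _ _ _
      _ = _ := h2
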